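-- pv_equiv track=rewrite | github.com/shaw14789/Code_Watermark | Code/medical_claim/medical_claim_extractor_v2.py | claims_to_anchor_texts
-- ===== SOURCE A (Python) =====
-- from typing import List, Dict, Any, Tuple
--
-- def claims_to_anchor_texts(must_have_claims: List[Dict[str, Any]]) -> Tuple[List[str], List[str]]:
--     """
--     把 claim 列表拆成：
--     - high_priority_texts: 用于 span-aware 主保护
--     - medium_priority_texts: 可选辅助
--     """
--     high_priority_texts = []
--     medium_priority_texts = []
--
--     for item in must_have_claims:
--         text = item["claim"].strip()
--         if not text:
--             continue
--         if item["priority"] == "high":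
--             high_priority_texts.append(text)
--         else:
--             medium_priority_texts.append(text)
--
--     def dedup_keep_order(xs: List[str]) -> List[str]:
--         out = []
--         seen = set()
--         for x in xs:
--             k = x.lower()
--             if k not in seen:
--                 seen.add(k)
--                 out.append(x)
--         return out
--
--     return dedup_keep_order(high_priority_texts), dedup_keep_order(medium_priority_texts)
-- ===== SOURCE B (Python) =====
-- def claims_to_anchor_texts(must_have_claims):
--     # Single fused pass: split and dedup-keep-order at once, with one seen set per group.
--     high_texts, medium_texts = [], []
--     seen_high, seen_medium = set(), set()
--     for item in must_have_claims:
--         text = item["claim"].strip()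
--         if not text:
--             continue
--         key = text.lower()
--         if item["priority"] == "high":
--             if key not in seen_high:
--                 seen_high.add(key)
--                 high_texts.append(text)
--         else:
--             if key not in seen_medium:
--                 seen_medium.add(key)
--                 medium_texts.append(text)
--     return high_texts, medium_texts
-- ===== Notes on version B (the rewrite author's own statement) =====
-- stated objective: alternative
-- what changed: Replaces A's split-into-two-lists pass followed by a separate dedup_keep_order pass per list with one fused pass that filters, routes by priority and dedups in place using two seen sets, never materialising the intermediate lists.
import Mathlib
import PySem

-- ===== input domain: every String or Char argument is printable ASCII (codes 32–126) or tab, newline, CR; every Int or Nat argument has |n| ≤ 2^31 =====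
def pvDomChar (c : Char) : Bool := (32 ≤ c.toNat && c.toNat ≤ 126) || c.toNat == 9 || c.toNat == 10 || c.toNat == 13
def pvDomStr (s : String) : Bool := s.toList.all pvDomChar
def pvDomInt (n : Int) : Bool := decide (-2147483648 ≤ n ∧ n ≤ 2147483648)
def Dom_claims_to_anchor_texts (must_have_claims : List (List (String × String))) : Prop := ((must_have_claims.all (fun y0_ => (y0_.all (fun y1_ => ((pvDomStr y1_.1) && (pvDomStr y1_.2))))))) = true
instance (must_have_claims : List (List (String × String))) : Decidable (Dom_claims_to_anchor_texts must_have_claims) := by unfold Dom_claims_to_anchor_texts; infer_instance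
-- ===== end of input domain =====

-- B changes: one fused pass (filter + route + dedup with two seen sets) instead of split then per-list dedup.
-- Both ports read missing dict keys as "" (Python raises KeyError there; Pre_ excludes those inputs).
-- item[k]: first match in the association list (Python dict lookup); "" where the key is absent (excluded by Pre_)
def pvGetKey (item : List (String × String)) (k : String) : String :=
  ((item.find? (fun p => p.1 == k)).map Prod.snd).getD ""

-- ===== PORT A =====
-- the inner helper dedup_keep_order, verbatim: fold carrying (out, seen-set of lowercased texts)
def dedupKeepOrder (xs : List String) : List String :=
  (xs.foldl (fun (st : List String × PySem.Set String) x =>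
      let k := PySem.Str.lower x
      if st.2.contains k then st else (st.1 ++ [x], PySem.Set.add st.2 k))
    ([], PySem.Set.empty)).1

def claims_to_anchor_texts (must_have_claims : List (List (String × String))) : List String × List String :=
  let split := must_have_claims.foldl (fun (st : List String × List String) item =>
      let text := PySem.Str.strip (pvGetKey item "claim")
      if text == "" then st
      else if pvGetKey item "priority" == "high" then (st.1 ++ [text], st.2)
      else (st.1, st.2 ++ [text]))
    ([], [])
  (dedupKeepOrder split.1, dedupKeepOrder split.2)

-- ===== PORT B =====
-- fused single pass; state = (high_texts, seen_high, medium_texts, seen_medium)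
def claims_to_anchor_texts_alt (must_have_claims : List (List (String × String))) : List String × List String :=
  let st := must_have_claims.foldl
    (fun (st : (List String × PySem.Set String) × (List String × PySem.Set String)) item =>
      let text := PySem.Str.strip (pvGetKey item "claim")
      if text == "" then st
      else
        let key := PySem.Str.lower text
        if pvGetKey item "priority" == "high" then
          if st.1.2.contains key then st
          else ((st.1.1 ++ [text], PySem.Set.add st.1.2 key), st.2)
        else
          if st.2.2.contains key then st
          else (st.1, (st.2.1 ++ [text], PySem.Set.add st.2.2 key)))
    (([], PySem.Set.empty), ([], PySem.Set.empty))
  (st.1.1, st.2.1)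

-- ===== PRECONDITION & SPEC =====
-- Pre_ excludes exactly the inputs where Python A raises KeyError: an item without a "claim" key,
-- or an item with a non-blank claim but no "priority" key. (B raises the same way there.)
def Pre_claims_to_anchor_texts (must_have_claims : List (List (String × String))) : Prop :=
  ∀ item ∈ must_have_claims,
    (item.find? (fun p => p.1 == "claim")).isSome = true ∧
    (PySem.Str.strip (pvGetKey item "claim") ≠ "" →
      (item.find? (fun p => p.1 == "priority")).isSome = true)
instance (must_have_claims : List (List (String × String))) : Decidable (Pre_claims_to_anchor_texts must_have_claims) := by unfold Pre_claims_to_anchor_texts; infer_instance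
def pvWitness_claims_to_anchor_texts : (List (List (String × String))) :=
  [[("claim", " A "), ("priority", "high")], [("claim", "a"), ("priority", "low")], [("claim", "  ")]]

def Spec_claims_to_anchor_texts (must_have_claims : List (List (String × String))) (out : List String × List String) : Prop := out = claims_to_anchor_texts_alt must_have_claims
instance (must_have_claims : List (List (String × String))) (out : List String × List String) : Decidable (Spec_claims_to_anchor_texts must_have_claims out) := by unfold Spec_claims_to_anchor_texts; infer_instance

-- ===== CLAIM (what is proved, stated in full; the proofs are below) =====
def Claim_equal_claims_to_anchor_texts : Prop := ∀ (must_have_claims : List (List (String × String))), Dom_claims_to_anchor_texts must_have_claims → Pre_claims_to_anchor_texts must_have_claims → Spec_claims_to_anchor_texts must_have_claims (claims_to_anchor_texts must_have_claims)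

-- ===== LEMMAS AND PROOFS =====

-- the texts routed to the high / medium buckets, as filterMaps (proof-only characterisation)
def highTexts (items : List (List (String × String))) : List String :=
  items.filterMap (fun item =>
    let text := PySem.Str.strip (pvGetKey item "claim")
    if text == "" then none
    else if pvGetKey item "priority" == "high" then some text else none)

def medTexts (items : List (List (String × String))) : List String :=
  items.filterMap (fun item =>
    let text := PySem.Str.strip (pvGetKey item "claim")
    if text == "" then none
    else if pvGetKey item "priority" == "high" then none else some text)

-- one dedup step / dedup from an arbitrary state
def ddStep (st : List String × PySem.Set String) (x : String) : List String × PySem.Set String :=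
  let k := PySem.Str.lower x
  if st.2.contains k then st else (st.1 ++ [x], PySem.Set.add st.2 k)

theorem splitA_eq (items : List (List (String × String))) (h m : List String) :
    items.foldl (fun (st : List String × List String) item =>
      let text := PySem.Str.strip (pvGetKey item "claim")
      if text == "" then st
      else if pvGetKey item "priority" == "high" then (st.1 ++ [text], st.2)
      else (st.1, st.2 ++ [text])) (h, m)
    = (h ++ highTexts items, m ++ medTexts items) := by
  induction items generalizing h m with
  | nil => simp [highTexts, medTexts]
  | cons item rest ih =>
    simp only [List.foldl_cons]
    by_cases h1 : PySem.Str.strip (pvGetKey item "claim") = ""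
    · simpa [highTexts, medTexts, h1] using ih h m
    · by_cases h2 : pvGetKey item "priority" = "high"
      · simpa [highTexts, medTexts, h1, h2] using
          ih (h ++ [PySem.Str.strip (pvGetKey item "claim")]) m
      · simpa [highTexts, medTexts, h1, h2] using
          ih h (m ++ [PySem.Str.strip (pvGetKey item "claim")])

theorem fusedB_eq (items : List (List (String × String)))
    (sh sm : List String × PySem.Set String) :
    items.foldl
      (fun (st : (List String × PySem.Set String) × (List String × PySem.Set String)) item =>
        let text := PySem.Str.strip (pvGetKey item "claim")
        if text == "" then st
        else
          let key := PySem.Str.lower text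
          if pvGetKey item "priority" == "high" then
            if st.1.2.contains key then st
            else ((st.1.1 ++ [text], PySem.Set.add st.1.2 key), st.2)
          else
            if st.2.2.contains key then st
            else (st.1, (st.2.1 ++ [text], PySem.Set.add st.2.2 key)))
      (sh, sm)
    = ((highTexts items).foldl ddStep sh, (medTexts items).foldl ddStep sm) := by
  induction items generalizing sh sm with
  | nil => simp [highTexts, medTexts]
  | cons item rest ih =>
    simp only [List.foldl_cons]
    by_cases h1 : PySem.Str.strip (pvGetKey item "claim") = ""
    · simpa [highTexts, medTexts, h1] using ih sh sm
    · by_cases h2 : pvGetKey item "priority" = "high"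
      · by_cases h3 : PySem.Str.lower (PySem.Str.strip (pvGetKey item "claim")) ∈ sh.2
        · simpa [highTexts, medTexts, h1, h2, h3, ddStep] using ih sh sm
        · simpa [highTexts, medTexts, h1, h2, h3, ddStep] using
            ih (sh.1 ++ [PySem.Str.strip (pvGetKey item "claim")],
                PySem.Set.add sh.2 (PySem.Str.lower (PySem.Str.strip (pvGetKey item "claim")))) sm
      · by_cases h3 : PySem.Str.lower (PySem.Str.strip (pvGetKey item "claim")) ∈ sm.2
        · simpa [highTexts, medTexts, h1, h2, h3, ddStep] using ih sh sm
        · simpa [highTexts, medTexts, h1, h2, h3, ddStep] using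
            ih sh (sm.1 ++ [PySem.Str.strip (pvGetKey item "claim")],
                PySem.Set.add sm.2 (PySem.Str.lower (PySem.Str.strip (pvGetKey item "claim"))))

-- ===== VERDICT (by name: the statement is the Claim_ definition above) =====
theorem claims_to_anchor_texts_spec : Claim_equal_claims_to_anchor_texts := by
  intro items _ _
  show claims_to_anchor_texts items = claims_to_anchor_texts_alt items
  unfold claims_to_anchor_texts claims_to_anchor_texts_alt dedupKeepOrder
  rw [splitA_eq, fusedB_eq]
  rfl
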